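-- pv_equiv track=rewrite | github.com/himanshu9345/Leet-Code-Practice | weekly-contest-158/5225. Maximum Equal Frequency.py | check
-- ===== SOURCE A (Python) =====
-- def check(dict2):
--     keys1=dict2.keys()
--     c=0
--     for k in dict2:
--         if len(dict2[k])==1:
--             if k==1:
--                 return True
--             for k1 in dict2:
--                 if k1!=k:
--                     if k1%2 and not k%2 and k>k1:
--                         return True
--                     if k%2 and not k1%2 and k>k1:
--                         return True
--
--                     if k1==1 and not k%2:
--                         return True
--
--
--     return False
-- ===== SOURCE B (Python) =====
-- def check(dict2):
--     # One pass over the keys computes the minimum odd key, the minimum even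
--     # key and whether 1 is a key; each length-1 entry is then checked against them.
--     min_odd = None
--     min_even = None
--     has_one = False
--     for k in dict2:
--         if k % 2:
--             if min_odd is None or k < min_odd:
--                 min_odd = k
--         else:
--             if min_even is None or k < min_even:
--                 min_even = k
--         if k == 1:
--             has_one = True
--     for k, v in dict2.items():
--         if len(v) == 1:
--             if k == 1:
--                 return True
--             if k % 2 == 0:
--                 if has_one or (min_odd is not None and min_odd < k):
--                     return True
--             elif min_even is not None and min_even < k:
--                 return True
--     return False
-- ===== Notes on version B (the rewrite author's own statement) =====
-- stated objective: alternative
-- what changed: Replaces A's nested scan over the other keys for every length-1 key by a single precomputation of the minimum odd key, minimum even key and a has-1 flag, against which each length-1 key is checked directly.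
import Mathlib
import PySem

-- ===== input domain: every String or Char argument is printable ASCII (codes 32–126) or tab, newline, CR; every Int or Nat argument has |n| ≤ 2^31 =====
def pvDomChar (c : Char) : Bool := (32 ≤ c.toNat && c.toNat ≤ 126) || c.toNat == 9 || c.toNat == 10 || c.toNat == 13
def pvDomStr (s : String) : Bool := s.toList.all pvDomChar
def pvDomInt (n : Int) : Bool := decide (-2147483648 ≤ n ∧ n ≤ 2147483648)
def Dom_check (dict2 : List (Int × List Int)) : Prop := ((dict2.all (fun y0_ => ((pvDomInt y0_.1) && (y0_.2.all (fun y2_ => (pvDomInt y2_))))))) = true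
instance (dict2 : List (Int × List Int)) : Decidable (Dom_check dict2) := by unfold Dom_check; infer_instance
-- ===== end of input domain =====

-- B replaces A's inner scan over the other keys by a precomputed minimum odd key /
-- minimum even key / "1 is a key" flag, against which each length-1 key is checked directly (alternative algorithm).

-- ===== PORT A =====
-- dict2[k] : first-match lookup (k always present, so the py-KeyError branch is unreachable)
def lookupA (dict2 : List (Int × List Int)) (k : Int) : List Int :=
  match dict2 with
  | [] => []
  | (k', v) :: t => if k' == k then v else lookupA t k

-- A's inner 'for k1 in dict2' loop with its three early-return conditions
def innerA (dict2 : List (Int × List Int)) (k : Int) : Bool :=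
  (dict2.map Prod.fst).any (fun k1 =>
    if k1 != k then
      (decide (PySem.Int.mod k1 2 ≠ 0) && decide (PySem.Int.mod k 2 = 0) && decide (k1 < k)) ||
      (decide (PySem.Int.mod k 2 ≠ 0) && decide (PySem.Int.mod k1 2 = 0) && decide (k1 < k)) ||
      (decide (k1 = 1) && decide (PySem.Int.mod k 2 = 0))
    else false)

def check (dict2 : List (Int × List Int)) : Bool :=
  (dict2.map Prod.fst).any (fun k =>
    if (lookupA dict2 k).length == 1 then
      if k == 1 then true else innerA dict2 k
    else false)

-- ===== PORT B =====
def updMin (o : Option Int) (k : Int) : Option Int :=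
  match o with
  | none => some k
  | some m => if k < m then some k else some m

-- one step of B's first loop: state = (min_odd, min_even, has_one)
def stepB (st : Option Int × Option Int × Bool) (k : Int) : Option Int × Option Int × Bool :=
  match st with
  | (mo, me, h1) =>
    if PySem.Int.mod k 2 ≠ 0 then (updMin mo k, me, h1 || (k == 1))
    else (mo, updMin me k, h1 || (k == 1))

def optLt (o : Option Int) (k : Int) : Bool :=
  match o with
  | some m => decide (m < k)
  | none => false

def check_alt (dict2 : List (Int × List Int)) : Bool :=
  let st := (dict2.map Prod.fst).foldl stepB (none, none, false)
  dict2.any (fun p =>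
    if p.2.length == 1 then
      if p.1 == 1 then true
      else if PySem.Int.mod p.1 2 = 0 then st.2.2 || optLt st.1 p.1
      else optLt st.2.1 p.1
    else false)

-- ===== PRECONDITION & SPEC =====
-- Pre_ excludes association lists with duplicate keys: they do not represent a Python
-- dict (dict construction merges them), so neither port's behaviour there is A's.
def Pre_check (dict2 : List (Int × List Int)) : Prop := (dict2.map Prod.fst).Nodup
instance (dict2 : List (Int × List Int)) : Decidable (Pre_check dict2) := by unfold Pre_check; infer_instance
def pvWitness_check : (List (Int × List Int)) := [(1, [0]), (2, [0, 0])]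

def Spec_check (dict2 : List (Int × List Int)) (out : Bool) : Prop := out = check_alt dict2
instance (dict2 : List (Int × List Int)) (out : Bool) : Decidable (Spec_check dict2 out) := by unfold Spec_check; infer_instance

-- ===== CLAIM (what is proved, stated in full; the proofs are below) =====
def Claim_equal_check : Prop := ∀ (dict2 : List (Int × List Int)), Dom_check dict2 → Pre_check dict2 → Spec_check dict2 (check dict2)

-- ===== LEMMAS AND PROOFS =====

theorem optLt_updMin (o : Option Int) (x k : Int) :
    optLt (updMin o x) k = (optLt o k || decide (x < k)) := by
  cases o with
  | none => simp [updMin, optLt]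
  | some m =>
    by_cases h : x < m
    · have hu : updMin (some m) x = some x := by simp [updMin, h]
      rw [hu]; simp only [optLt]
      cases hm : decide (m < k) <;> cases hx2 : decide (x < k) <;> simp_all <;> try omega
    · have hu : updMin (some m) x = some m := by simp [updMin, h]
      rw [hu]; simp only [optLt]
      cases hm : decide (m < k) <;> cases hx2 : decide (x < k) <;> simp_all <;> try omega

-- characterisation of B's first loop
theorem foldB_char (l : List Int) (mo me : Option Int) (h1 : Bool) (k : Int) :
    (optLt (l.foldl stepB (mo, me, h1)).1 k
       = (optLt mo k || l.any (fun x => decide (PySem.Int.mod x 2 ≠ 0) && decide (x < k)))) ∧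
    (optLt (l.foldl stepB (mo, me, h1)).2.1 k
       = (optLt me k || l.any (fun x => decide (PySem.Int.mod x 2 = 0) && decide (x < k)))) ∧
    ((l.foldl stepB (mo, me, h1)).2.2 = (h1 || l.any (fun x => x == 1))) := by
  induction l generalizing mo me h1 with
  | nil => simp
  | cons x t ih =>
    simp only [List.foldl_cons, List.any_cons, stepB]
    by_cases hx : PySem.Int.mod x 2 ≠ 0
    · rw [if_pos hx]
      have hxd : decide (PySem.Int.mod x 2 ≠ 0) = true := decide_eq_true hx
      have hxe : decide (PySem.Int.mod x 2 = 0) = false := decide_eq_false hx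
      have := ih (updMin mo x) me (h1 || (x == 1))
      refine ⟨?_, ?_, ?_⟩
      · rw [this.1, optLt_updMin, hxd]
        cases h : decide (x < k) <;> simp
      · rw [this.2.1, hxe]; simp
      · rw [this.2.2]; ac_rfl
    · rw [if_neg hx]
      have hx' : PySem.Int.mod x 2 = 0 := not_not.mp hx
      have hxd : decide (PySem.Int.mod x 2 ≠ 0) = false := decide_eq_false hx
      have hxe : decide (PySem.Int.mod x 2 = 0) = true := decide_eq_true hx'
      have := ih mo (updMin me x) (h1 || (x == 1))
      refine ⟨?_, ?_, ?_⟩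
      · rw [this.1, hxd]; simp
      · rw [this.2.1, optLt_updMin, hxe]
        cases h : decide (x < k) <;> simp
      · rw [this.2.2]; ac_rfl

theorem mod_one_two : PySem.Int.mod 1 2 = 1 := by decide

theorem anyOrSplit (l : List Int) (f g : Int → Bool) :
    l.any (fun x => f x || g x) = (l.any f || l.any g) := by
  induction l with
  | nil => simp
  | cons x t ih => simp [List.any_cons, ih]; ac_rfl

-- A's inner loop equals B's condition over the precomputed extrema
theorem innerA_eq (dict2 : List (Int × List Int)) (k : Int) :
    innerA dict2 k =
      (if PySem.Int.mod k 2 = 0 then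
        ((dict2.map Prod.fst).foldl stepB (none, none, false)).2.2
          || optLt ((dict2.map Prod.fst).foldl stepB (none, none, false)).1 k
       else optLt ((dict2.map Prod.fst).foldl stepB (none, none, false)).2.1 k) := by
  have hc := foldB_char (dict2.map Prod.fst) none none false k
  unfold innerA
  by_cases hk : PySem.Int.mod k 2 = 0
  · have hke : decide (PySem.Int.mod k 2 = 0) = true := decide_eq_true hk
    have hkd : decide (PySem.Int.mod k 2 ≠ 0) = false := by rw [decide_not, hke]; rfl
    rw [if_pos hk, hc.2.2, hc.1]
    simp only [optLt, Bool.false_or]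
    rw [← anyOrSplit]
    apply PySem.List.any_congr_mem
    intro x _
    by_cases hxk : x = k
    · subst hxk
      rw [hkd]
      have hx1 : (x == 1) = false := by
        rw [beq_eq_false_iff_ne]
        intro h; rw [h, mod_one_two] at hk; exact one_ne_zero hk
      simp [hx1]
    · have h1 : (x != k) = true := by simp [hxk]
      rw [if_pos h1, hke, hkd]
      cases hA : decide (PySem.Int.mod x 2 ≠ 0) <;>
        cases hB : decide (x < k) <;>
        cases hC : (x == 1) <;>
        simp_all [beq_iff_eq]
  · have hko : decide (PySem.Int.mod k 2 = 0) = false := decide_eq_false hk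
    have hkn : decide (PySem.Int.mod k 2 ≠ 0) = true := by rw [decide_not, hko]; rfl
    rw [if_neg hk, hc.2.1]
    simp only [optLt, Bool.false_or]
    apply PySem.List.any_congr_mem
    intro x _
    by_cases hxk : x = k
    · subst hxk
      rw [hko]
      simp
    · have h1 : (x != k) = true := by simp [hxk]
      rw [if_pos h1, hko, hkn]
      simp

-- under distinct keys, the first-match lookup of a present key returns its value
theorem lookupA_nodup : ∀ (dict2 : List (Int × List Int)), (dict2.map Prod.fst).Nodup →
    ∀ p ∈ dict2, lookupA dict2 p.1 = p.2 := by
  intro dict2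
  induction dict2 with
  | nil => intro _ p hp; cases hp
  | cons q t ih =>
    intro hnd p hp
    obtain ⟨k, v⟩ := q
    simp only [List.map_cons, List.nodup_cons] at hnd
    cases hp with
    | head => simp [lookupA]
    | tail _ hpt =>
      have hne : k ≠ p.1 := by
        intro h; exact hnd.1 (h ▸ List.mem_map_of_mem hpt)
      simp only [lookupA, beq_iff_eq, if_neg hne]
      exact ih hnd.2 p hpt

-- ===== VERDICT (by name: the statement is the Claim_ definition above) =====
theorem check_spec : Claim_equal_check := by
  intro dict2 _ hpre
  unfold Spec_check check check_alt
  rw [List.any_map]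
  apply PySem.List.any_congr_mem
  intro p hp
  simp only [Function.comp]
  rw [lookupA_nodup dict2 hpre p hp, innerA_eq]
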